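-- pv_equiv track=rewrite | github.com/pablogventura/algoritmos3 | algoritmos/coloreo/probando.py | grafo10
-- ===== SOURCE A (Python) =====
-- def grafo10(n):
--     result = {}
--
--     for i in range(n):
--         for j in range(n):
--             result[(i,j)] = []
--
--     for i in range(n):
--         for j in range(n):
--             horizontales = [(i1,j) for i1 in range(n)]
--             horizontales.remove((i,j))
--             verticales   = [(i,j1) for j1 in range(n)]
--             verticales.remove((i,j))
--
--             diagas = []
--             for i1 in range(n):
--                 for j1 in range(n):
--                     if i + j == i1 + j1:
--                         diagas += [(i1,j1)]
--             diagas.remove((i,j))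
--
--             diagdes = []
--             for i1 in range(n):
--                 for j1 in range(n):
--                     if i - j == i1 - j1:
--                         diagdes += [(i1,j1)]
--             diagdes.remove((i,j))
--
--             result[(i,j)]= horizontales + verticales + diagas + diagdes
--
--     return result
-- ===== SOURCE B (Python) =====
-- def grafo10(n):
--     result = {}
--     for i in range(n):
--         for j in range(n):
--             horiz = [(i1, j) for i1 in range(n) if i1 != i]
--             vert = [(i, j1) for j1 in range(n) if j1 != j]
--             s = i + j
--             diag_a = [(i1, s - i1) for i1 in range(max(0, s - n + 1), min(n, s + 1)) if i1 != i]
--             d = i - j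
--             diag_d = [(i1, i1 - d) for i1 in range(max(0, d), min(n, n + d)) if i1 != i]
--             result[(i, j)] = horiz + vert + diag_a + diag_d
--     return result
-- ===== Notes on version B (the rewrite author's own statement) =====
-- stated objective: faster
-- what changed: Each cell's two diagonals are produced directly by the index formulas j1 = i+j-i1 and j1 = i1-(i-j) over a computed i1-window, and same-row/column/diagonal cells are skipped with i1 != i in the comprehension, removing both the O(n^2) full-grid scan per cell and the list .remove pass.
import Mathlib
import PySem

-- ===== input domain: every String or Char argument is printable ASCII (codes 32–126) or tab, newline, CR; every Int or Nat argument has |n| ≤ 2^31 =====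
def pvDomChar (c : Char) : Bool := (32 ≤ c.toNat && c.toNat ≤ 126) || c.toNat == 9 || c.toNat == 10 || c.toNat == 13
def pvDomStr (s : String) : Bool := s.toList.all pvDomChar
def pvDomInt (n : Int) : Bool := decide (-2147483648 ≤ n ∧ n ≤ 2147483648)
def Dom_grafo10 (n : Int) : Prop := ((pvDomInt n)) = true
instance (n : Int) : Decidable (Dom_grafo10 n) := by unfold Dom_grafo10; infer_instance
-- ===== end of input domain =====

-- B replaces A's per-cell full-grid diagonal scans and list .remove passes with direct
-- index-formula windows (j1 = i+j-i1 / j1 = i1-(i-j)) and an i1 ≠ i test; objective: faster.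

-- ===== PORT A =====
-- A-side helper: the neighbour list A stores at result[(i,j)] (computed inline in A's loop body).
def grafo10_body (n i j : Int) : List (Int × Int) :=
  let horizontales := (PySem.List.pyRange 0 n 1).map (fun i1 => (i1, j))
  -- 'horizontales.remove((i,j))' etc.: (i,j) is always present here, so remove? is never none
  let horizontales := (PySem.List.remove? horizontales (i, j)).getD []
  let verticales := (PySem.List.pyRange 0 n 1).map (fun j1 => (i, j1))
  let verticales := (PySem.List.remove? verticales (i, j)).getD []
  let diagas := (PySem.List.pyRange 0 n 1).foldl (fun acc i1 =>
    (PySem.List.pyRange 0 n 1).foldl (fun acc j1 =>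
      if i + j = i1 + j1 then acc ++ [(i1, j1)] else acc) acc) []
  let diagas := (PySem.List.remove? diagas (i, j)).getD []
  let diagdes := (PySem.List.pyRange 0 n 1).foldl (fun acc i1 =>
    (PySem.List.pyRange 0 n 1).foldl (fun acc j1 =>
      if i - j = i1 - j1 then acc ++ [(i1, j1)] else acc) acc) []
  let diagdes := (PySem.List.remove? diagdes (i, j)).getD []
  horizontales ++ verticales ++ diagas ++ diagdes

def grafo10 (n : Int) : List (Int × Int × List (Int × Int)) :=
  let result : PySem.Dict (Int × Int) (List (Int × Int)) :=
    (PySem.List.pyRange 0 n 1).foldl (fun d i =>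
      (PySem.List.pyRange 0 n 1).foldl (fun d j => d.insert (i, j) []) d)
      PySem.Dict.empty
  let result :=
    (PySem.List.pyRange 0 n 1).foldl (fun d i =>
      (PySem.List.pyRange 0 n 1).foldl (fun d j => d.insert (i, j) (grafo10_body n i j)) d)
      result
  result.items.map (fun q => (q.1.1, q.1.2, q.2))

-- ===== PORT B =====
-- B-side helper: the neighbour list B computes for cell (i,j) by direct index formulas.
def grafo10_alt_body (n i j : Int) : List (Int × Int) :=
  let horiz := ((PySem.List.pyRange 0 n 1).filter (fun i1 => !(i1 == i))).map (fun i1 => (i1, j))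
  let vert := ((PySem.List.pyRange 0 n 1).filter (fun j1 => !(j1 == j))).map (fun j1 => (i, j1))
  let s := i + j
  let diagA := ((PySem.List.pyRange (max 0 (s - n + 1)) (min n (s + 1)) 1).filter
      (fun i1 => !(i1 == i))).map (fun i1 => (i1, s - i1))
  let d := i - j
  let diagD := ((PySem.List.pyRange (max 0 d) (min n (n + d)) 1).filter
      (fun i1 => !(i1 == i))).map (fun i1 => (i1, i1 - d))
  horiz ++ vert ++ diagA ++ diagD

def grafo10_alt (n : Int) : List (Int × Int × List (Int × Int)) :=
  let result : PySem.Dict (Int × Int) (List (Int × Int)) :=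
    (PySem.List.pyRange 0 n 1).foldl (fun d i =>
      (PySem.List.pyRange 0 n 1).foldl (fun d j => d.insert (i, j) (grafo10_alt_body n i j)) d)
      PySem.Dict.empty
  result.items.map (fun q => (q.1.1, q.1.2, q.2))

-- ===== PRECONDITION & SPEC =====
def Spec_grafo10 (n : Int) (out : List (Int × Int × List (Int × Int))) : Prop := out = grafo10_alt n
instance (n : Int) (out : List (Int × Int × List (Int × Int))) : Decidable (Spec_grafo10 n out) := by unfold Spec_grafo10; infer_instance

-- ===== CLAIM (what is proved, stated in full; the proofs are below) =====
def Claim_equal_grafo10 : Prop := ∀ (n : Int), Dom_grafo10 n → Spec_grafo10 n (grafo10 n)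

-- ===== LEMMAS AND PROOFS =====

def pvGrid (n : Int) : List (Int × Int) :=
  (PySem.List.pyRange 0 n 1) ×ˢ (PySem.List.pyRange 0 n 1)

theorem items_mk {κ ν : Type} (xs : List (κ × ν)) : (PySem.Dict.mk xs).items = xs := rfl

theorem flatMap_singleton_map {α β : Type} (l : List α) (f : α → β) :
    l.flatMap (fun x => [f x]) = l.map f := by
  induction l with
  | nil => rfl
  | cons x xs ih => simp [List.flatMap_cons, ih]

theorem flatMap_congr_mem {α β : Type} {l : List α} {g g' : α → List β}
    (h : ∀ x ∈ l, g x = g' x) : l.flatMap g = l.flatMap g' := by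
  induction l with
  | nil => rfl
  | cons x xs ih =>
    simp only [List.flatMap_cons]
    rw [h x (by simp), ih (fun y hy => h y (by simp [hy]))]

-- a nested for-loop over i then j is a single fold over the product list
theorem foldl_foldl_product {α : Type} (l1 l2 : List Int) (f : α → Int × Int → α) (init : α) :
    l1.foldl (fun a i => l2.foldl (fun a j => f a (i, j)) a) init = (l1 ×ˢ l2).foldl f init := by
  induction l1 generalizing init with
  | nil => rfl
  | cons x xs ih =>
    simp only [List.foldl_cons, List.product_cons, List.foldl_append, List.foldl_map, ih]

theorem nodup_grid (n : Int) : (pvGrid n).Nodup :=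
  List.Nodup.product (PySem.List.nodup_pyRange_one 0 n) (PySem.List.nodup_pyRange_one 0 n)

theorem map_replace_of_not_mem {κ ν : Type} [BEq κ] [LawfulBEq κ]
    (xs : List (κ × ν)) (k : κ) (v : ν) (h : k ∉ xs.map Prod.fst) :
    xs.map (fun p => if p.1 == k then (k, v) else p) = xs := by
  induction xs with
  | nil => rfl
  | cons p ps ih =>
    simp only [List.map_cons, List.mem_cons, not_or] at h
    have h1 : (p.1 == k) = false := beq_eq_false_iff_ne.mpr (fun he => h.1 he.symm)
    simp only [List.map_cons, h1, Bool.false_eq_true, if_false, ih h.2]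

-- a fold of overwrites of already-present distinct keys rewrites the values in place
theorem foldl_insert_overwrite {κ ν : Type} [BEq κ] [LawfulBEq κ]
    (l : List κ) (pre : List (κ × ν)) (f g : κ → ν)
    (h : (pre.map Prod.fst ++ l).Nodup) :
    (l.foldl (fun d k => d.insert k (f k))
      (PySem.Dict.mk (pre ++ l.map (fun k => (k, g k))))).items
    = pre ++ l.map (fun k => (k, f k)) := by
  induction l generalizing pre with
  | nil => simp [items_mk]
  | cons k ks ih =>
    have hnd := h
    rw [List.nodup_append] at hnd
    have hkpre : k ∉ pre.map Prod.fst := fun hm => hnd.2.2 k hm k (by simp) rfl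
    have hkks : k ∉ ks := by
      have := hnd.2.1
      simp only [List.nodup_cons] at this
      exact this.1
    simp only [List.foldl_cons, List.map_cons]
    have hins : (PySem.Dict.mk (pre ++ (k, g k) :: ks.map (fun k => (k, g k)))).insert k (f k)
        = PySem.Dict.mk ((pre ++ [(k, f k)]) ++ ks.map (fun k => (k, g k))) := by
      apply PySem.Dict.ext
      have hcont : (PySem.Dict.mk (pre ++ (k, g k) :: ks.map (fun k => (k, g k)))).contains k = true := by
        rw [PySem.Dict.contains_mk]
        refine List.any_eq_true.mpr ⟨(k, g k), by simp, by simp⟩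
      rw [PySem.Dict.items_insert_of_contains _ _ hcont, items_mk, items_mk,
        List.map_append, List.map_cons]
      rw [map_replace_of_not_mem pre k (f k) hkpre,
        map_replace_of_not_mem _ k (f k) (by simpa using hkks)]
      simp
    rw [hins, ih (pre ++ [(k, f k)]) (by simpa using h)]
    simp

theorem filter_eq_single (a b c : Int) :
    (PySem.List.pyRange a b 1).filter (fun x => x == c) = if a ≤ c ∧ c < b then [c] else [] := by
  rw [List.filter_beq]
  by_cases h : a ≤ c ∧ c < b
  · rw [if_pos h, List.count_eq_one_of_mem (PySem.List.nodup_pyRange_one a b)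
      (PySem.List.mem_pyRange_one.mpr h)]
    rfl
  · rw [if_neg h, List.count_eq_zero_of_not_mem (fun hm => h (PySem.List.mem_pyRange_one.mp hm))]
    rfl

theorem flatMap_window (a b lo hi : Int) (f : Int → Int × Int) (g : Int → List (Int × Int))
    (h1 : a ≤ lo) (h2 : lo ≤ hi) (h3 : hi ≤ b)
    (hg : ∀ x, a ≤ x → x < b → g x = if lo ≤ x ∧ x < hi then [f x] else []) :
    (PySem.List.pyRange a b 1).flatMap g = (PySem.List.pyRange lo hi 1).map f := by
  rw [PySem.List.pyRange_one_append a lo b h1 (h2.trans h3),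
    PySem.List.pyRange_one_append lo hi b h2 h3, List.flatMap_append, List.flatMap_append]
  have e1 : (PySem.List.pyRange a lo 1).flatMap g = [] := by
    refine List.flatMap_eq_nil_iff.mpr (fun x hx => ?_)
    obtain ⟨hxa, hxlo⟩ := PySem.List.mem_pyRange_one.mp hx
    rw [hg x hxa (by omega), if_neg (by omega)]
  have e3 : (PySem.List.pyRange hi b 1).flatMap g = [] := by
    refine List.flatMap_eq_nil_iff.mpr (fun x hx => ?_)
    obtain ⟨hxhi, hxb⟩ := PySem.List.mem_pyRange_one.mp hx
    rw [hg x (by omega) hxb, if_neg (by omega)]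
  have e2 : (PySem.List.pyRange lo hi 1).flatMap g = (PySem.List.pyRange lo hi 1).map f := by
    rw [flatMap_congr_mem (g' := fun x => [f x]) (fun x hx => ?_), flatMap_singleton_map]
    obtain ⟨hxlo, hxhi⟩ := PySem.List.mem_pyRange_one.mp hx
    rw [hg x (by omega) (by omega), if_pos (by omega)]
  rw [e1, e2, e3]
  simp

theorem remove_map_range (a b i : Int) (f : Int → Int × Int)
    (ha : a ≤ i) (hb : i < b) (hinj : ∀ x, a ≤ x → x < b → f x = f i → x = i) :
    (PySem.List.remove? ((PySem.List.pyRange a b 1).map f) (f i)).getD []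
    = ((PySem.List.pyRange a b 1).filter (fun x => !(x == i))).map f := by
  have hsplit : PySem.List.pyRange a b 1
      = PySem.List.pyRange a i 1 ++ i :: PySem.List.pyRange (i + 1) b 1 := by
    rw [PySem.List.pyRange_one_append a i b ha (le_of_lt hb), PySem.List.pyRange_one_cons hb]
  rw [hsplit, List.map_append, List.map_cons]
  have hmem : f i ∈ (PySem.List.pyRange a i 1).map f ++ f i :: (PySem.List.pyRange (i + 1) b 1).map f := by
    simp
  rw [PySem.List.remove?_eq_some_erase _ _ hmem, Option.getD_some]
  have hnotpre : f i ∉ (PySem.List.pyRange a i 1).map f := by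
    intro hm
    obtain ⟨x, hx, hfx⟩ := List.mem_map.mp hm
    obtain ⟨hxa, hxi⟩ := PySem.List.mem_pyRange_one.mp hx
    exact absurd (hinj x hxa (by omega) hfx) (by omega)
  rw [List.erase_append_right _ hnotpre, List.erase_cons_head]
  rw [List.filter_append, List.filter_cons]
  have hii : (!(i == i)) = false := by simp
  rw [hii]
  have hpre : (PySem.List.pyRange a i 1).filter (fun x => !(x == i)) = PySem.List.pyRange a i 1 := by
    refine List.filter_eq_self.mpr (fun x hx => ?_)
    obtain ⟨_, hxi⟩ := PySem.List.mem_pyRange_one.mp hx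
    have hne : x ≠ i := by omega
    simp [hne]
  have hsuf : (PySem.List.pyRange (i + 1) b 1).filter (fun x => !(x == i)) = PySem.List.pyRange (i + 1) b 1 := by
    refine List.filter_eq_self.mpr (fun x hx => ?_)
    obtain ⟨hxi, _⟩ := PySem.List.mem_pyRange_one.mp hx
    have hne : x ≠ i := by omega
    simp [hne]
  rw [hpre, hsuf]
  simp

theorem body_eq (n i j : Int) (hi0 : 0 ≤ i) (hin : i < n) (hj0 : 0 ≤ j) (hjn : j < n) :
    grafo10_body n i j = grafo10_alt_body n i j := by
  have hh := remove_map_range 0 n i (fun i1 => (i1, j)) hi0 hin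
    (fun x _ _ hx => by simpa using congrArg Prod.fst hx)
  have hv := remove_map_range 0 n j (fun j1 => (i, j1)) hj0 hjn
    (fun x _ _ hx => by simpa using congrArg Prod.snd hx)
  -- anti-diagonal: the nested grid scan is the window [max 0 (i+j-n+1), min n (i+j+1))
  have hda : ((PySem.List.pyRange 0 n 1).foldl (fun acc i1 =>
        (PySem.List.pyRange 0 n 1).foldl (fun acc j1 =>
          if i + j = i1 + j1 then acc ++ [(i1, j1)] else acc) acc) [])
      = (PySem.List.pyRange (max 0 (i + j - n + 1)) (min n (i + j + 1)) 1).map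
          (fun x => (x, i + j - x)) := by
    have h1 : ∀ (acc : List (Int × Int)) (i1 : Int),
        (PySem.List.pyRange 0 n 1).foldl (fun acc j1 =>
          if i + j = i1 + j1 then acc ++ [(i1, j1)] else acc) acc
        = acc ++ ((PySem.List.pyRange 0 n 1).filter
            (fun j1 => decide (i + j = i1 + j1))).map (fun j1 => (i1, j1)) :=
      fun acc i1 => PySem.List.foldl_append_ite _ _ _ _
    simp only [h1]
    rw [PySem.List.foldl_append_eq_flatMap, List.nil_append]
    refine flatMap_window 0 n _ _ _ _ (by omega) (by omega) (by omega) (fun x hx0 hxn => ?_)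
    have hc : (PySem.List.pyRange 0 n 1).filter (fun j1 => decide (i + j = x + j1))
        = (PySem.List.pyRange 0 n 1).filter (fun j1 => j1 == i + j - x) :=
      List.filter_congr (fun y _ => by by_cases h : i + j = x + y <;> simp [h] <;> omega)
    rw [hc, filter_eq_single]
    by_cases hw : max 0 (i + j - n + 1) ≤ x ∧ x < min n (i + j + 1)
    · rw [if_pos (by omega), if_pos hw, List.map_cons, List.map_nil]
    · rw [if_neg (by omega), if_neg hw, List.map_nil]
  have hdainj : ∀ x, max 0 (i + j - n + 1) ≤ x → x < min n (i + j + 1) →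
      (fun x => ((x : Int), i + j - x)) x = (fun x => ((x : Int), i + j - x)) i → x = i :=
    fun x _ _ hx => by simpa using congrArg Prod.fst hx
  have hda2 := remove_map_range (max 0 (i + j - n + 1)) (min n (i + j + 1)) i
    (fun x => (x, i + j - x)) (by omega) (by omega) hdainj
  -- main diagonal: the nested grid scan is the window [max 0 (i-j), min n (n+(i-j)))
  have hdd : ((PySem.List.pyRange 0 n 1).foldl (fun acc i1 =>
        (PySem.List.pyRange 0 n 1).foldl (fun acc j1 =>
          if i - j = i1 - j1 then acc ++ [(i1, j1)] else acc) acc) [])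
      = (PySem.List.pyRange (max 0 (i - j)) (min n (n + (i - j))) 1).map
          (fun x => (x, x - (i - j))) := by
    have h1 : ∀ (acc : List (Int × Int)) (i1 : Int),
        (PySem.List.pyRange 0 n 1).foldl (fun acc j1 =>
          if i - j = i1 - j1 then acc ++ [(i1, j1)] else acc) acc
        = acc ++ ((PySem.List.pyRange 0 n 1).filter
            (fun j1 => decide (i - j = i1 - j1))).map (fun j1 => (i1, j1)) :=
      fun acc i1 => PySem.List.foldl_append_ite _ _ _ _
    simp only [h1]
    rw [PySem.List.foldl_append_eq_flatMap, List.nil_append]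
    refine flatMap_window 0 n _ _ _ _ (by omega) (by omega) (by omega) (fun x hx0 hxn => ?_)
    have hc : (PySem.List.pyRange 0 n 1).filter (fun j1 => decide (i - j = x - j1))
        = (PySem.List.pyRange 0 n 1).filter (fun j1 => j1 == x - (i - j)) :=
      List.filter_congr (fun y _ => by by_cases h : i - j = x - y <;> simp [h] <;> omega)
    rw [hc, filter_eq_single]
    by_cases hw : max 0 (i - j) ≤ x ∧ x < min n (n + (i - j))
    · rw [if_pos (by omega), if_pos hw, List.map_cons, List.map_nil]
    · rw [if_neg (by omega), if_neg hw, List.map_nil]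
  have hddinj : ∀ x, max 0 (i - j) ≤ x → x < min n (n + (i - j)) →
      (fun x => ((x : Int), x - (i - j))) x = (fun x => ((x : Int), x - (i - j))) i → x = i :=
    fun x _ _ hx => by simpa using congrArg Prod.fst hx
  have hdd2 := remove_map_range (max 0 (i - j)) (min n (n + (i - j))) i
    (fun x => (x, x - (i - j))) (by omega) (by omega) hddinj
  have hija : ((i : Int), j) = (i, i + j - i) := by
    rw [show i + j - i = j by omega]
  have hijd : ((i : Int), j) = (i, i - (i - j)) := by
    rw [show i - (i - j) = j by omega]
  simp only [grafo10_body, grafo10_alt_body]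
  rw [hda, hdd, hija]
  rw [show (PySem.List.remove? ((PySem.List.pyRange (max 0 (i + j - n + 1)) (min n (i + j + 1)) 1).map
      (fun x => (x, i + j - x))) (i, i + j - i)).getD [] =
    ((PySem.List.pyRange (max 0 (i + j - n + 1)) (min n (i + j + 1)) 1).filter
      (fun x => !(x == i))).map (fun x => (x, i + j - x)) from hda2]
  rw [show ((i : Int), i + j - i) = (i, i - (i - j)) from by rw [← hija, ← hijd]]
  rw [show (PySem.List.remove? ((PySem.List.pyRange (max 0 (i - j)) (min n (n + (i - j))) 1).map
      (fun x => (x, x - (i - j)))) (i, i - (i - j))).getD [] =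
    ((PySem.List.pyRange (max 0 (i - j)) (min n (n + (i - j))) 1).filter
      (fun x => !(x == i))).map (fun x => (x, x - (i - j))) from hdd2]
  rw [← hijd]
  rw [hh, hv]

theorem grafo10_items (n : Int) :
    grafo10 n = (pvGrid n).map (fun p => (p.1, p.2, grafo10_body n p.1 p.2)) := by
  have e1 : (PySem.List.pyRange 0 n 1).foldl (fun d i =>
        (PySem.List.pyRange 0 n 1).foldl (fun d j => d.insert (i, j) ([] : List (Int × Int))) d)
        (PySem.Dict.empty)
      = (pvGrid n).foldl (fun d p => d.insert p ([] : List (Int × Int))) PySem.Dict.empty :=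
    foldl_foldl_product (PySem.List.pyRange 0 n 1) (PySem.List.pyRange 0 n 1)
      (fun d p => d.insert p ([] : List (Int × Int))) PySem.Dict.empty
  have e1' : (pvGrid n).foldl (fun d p => d.insert p ([] : List (Int × Int))) PySem.Dict.empty
      = PySem.Dict.mk ((pvGrid n).map (fun p => (p, ([] : List (Int × Int))))) := by
    apply PySem.Dict.ext
    have := PySem.Dict.items_foldl_insert_fresh (pvGrid n) (fun p => p)
      (fun _ => ([] : List (Int × Int))) PySem.Dict.empty
      (fun a _ => PySem.Dict.contains_empty a) (by simpa using nodup_grid n)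
    simpa [items_mk] using this
  have e2 : (PySem.List.pyRange 0 n 1).foldl (fun d i =>
        (PySem.List.pyRange 0 n 1).foldl (fun d j => d.insert (i, j) (grafo10_body n i j)) d)
        (PySem.Dict.mk ((pvGrid n).map (fun p => (p, ([] : List (Int × Int))))))
      = (pvGrid n).foldl (fun d p => d.insert p (grafo10_body n p.1 p.2))
        (PySem.Dict.mk ((pvGrid n).map (fun p => (p, ([] : List (Int × Int)))))) :=
    foldl_foldl_product (PySem.List.pyRange 0 n 1) (PySem.List.pyRange 0 n 1)
      (fun d p => d.insert p (grafo10_body n p.1 p.2))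
      (PySem.Dict.mk ((pvGrid n).map (fun p => (p, ([] : List (Int × Int))))))
  have e3 : ((pvGrid n).foldl (fun d p => d.insert p (grafo10_body n p.1 p.2))
        (PySem.Dict.mk ((pvGrid n).map (fun p => (p, ([] : List (Int × Int))))))).items
      = (pvGrid n).map (fun p => (p, grafo10_body n p.1 p.2)) := by
    have := foldl_insert_overwrite (pvGrid n) [] (fun p => grafo10_body n p.1 p.2)
      (fun _ => ([] : List (Int × Int))) (by simpa using nodup_grid n)
    simpa using this
  simp only [grafo10]
  rw [e1, e1', e2, e3, List.map_map]
  rfl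

theorem grafo10_alt_items (n : Int) :
    grafo10_alt n = (pvGrid n).map (fun p => (p.1, p.2, grafo10_alt_body n p.1 p.2)) := by
  have e1 : (PySem.List.pyRange 0 n 1).foldl (fun d i =>
        (PySem.List.pyRange 0 n 1).foldl (fun d j => d.insert (i, j) (grafo10_alt_body n i j)) d)
        (PySem.Dict.empty)
      = (pvGrid n).foldl (fun d p => d.insert p (grafo10_alt_body n p.1 p.2)) PySem.Dict.empty :=
    foldl_foldl_product (PySem.List.pyRange 0 n 1) (PySem.List.pyRange 0 n 1)
      (fun d p => d.insert p (grafo10_alt_body n p.1 p.2)) PySem.Dict.empty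
  have e2 : ((pvGrid n).foldl (fun d p => d.insert p (grafo10_alt_body n p.1 p.2))
        PySem.Dict.empty).items
      = (pvGrid n).map (fun p => (p, grafo10_alt_body n p.1 p.2)) := by
    have := PySem.Dict.items_foldl_insert_fresh (pvGrid n) (fun p => p)
      (fun p => grafo10_alt_body n p.1 p.2) PySem.Dict.empty
      (fun a _ => PySem.Dict.contains_empty a) (by simpa using nodup_grid n)
    simpa using this
  simp only [grafo10_alt]
  rw [e1, e2, List.map_map]
  rfl

-- ===== VERDICT (by name: the statement is the Claim_ definition above) =====
theorem grafo10_spec : Claim_equal_grafo10 := by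
  intro n _
  unfold Spec_grafo10
  rw [grafo10_items, grafo10_alt_items]
  refine List.map_congr_left (fun p hp => ?_)
  obtain ⟨i, j⟩ := p
  obtain ⟨hi, hj⟩ := List.mem_product.mp hp
  obtain ⟨hi0, hin⟩ := PySem.List.mem_pyRange_one.mp hi
  obtain ⟨hj0, hjn⟩ := PySem.List.mem_pyRange_one.mp hj
  simp only [body_eq n i j hi0 hin hj0 hjn]
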